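-- pv_equiv track=rewrite | github.com/pypi-data/pypi-mirror-244 | packages/aoccasper/aoccasper-0.0.2.tar.gz/aoccasper-0.0.2/aoccasper/day3/main.py | _retreive_number_infos
-- ===== SOURCE A (Python) =====
-- from typing import NamedTuple
--
-- NumberInfo = NamedTuple("NumberInfo", number=int, x_start=int, x_end=int, y=int)
--
-- def _retreive_number_infos(strings: list[str]):
--     number_infos = []
--     for i_row, row in enumerate(strings):
--         start_idx, in_number = 0, False
--         for i_col, col in enumerate(row):
--             if col.isnumeric():
--                 if not in_number:
--                     in_number = True
--                     start_idx = i_col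
--             else:
--                 if in_number:
--                     number_infos.append(NumberInfo(int(row[start_idx:i_col]), start_idx, i_col, i_row))
--                     in_number = False
--         if in_number:
--             number_infos.append(NumberInfo(int(row[start_idx:len(row)]), start_idx, len(row), i_row))
--     return number_infos
-- ===== SOURCE B (Python) =====
-- from itertools import groupby
-- from typing import NamedTuple
--
-- NumberInfo = NamedTuple("NumberInfo", number=int, x_start=int, x_end=int, y=int)
--
-- def _retreive_number_infos(strings: list[str]):
--     number_infos = []
--     for i_row, row in enumerate(strings):
--         col = 0
--         for is_num, group in groupby(row, key=str.isnumeric):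
--             chars = list(group)
--             if is_num:
--                 number_infos.append(NumberInfo(int("".join(chars)), col, col + len(chars), i_row))
--             col += len(chars)
--     return number_infos
-- ===== Notes on version B (the rewrite author's own statement) =====
-- stated objective: idiomatic
-- what changed: Replaces the stateful in_number/start_idx character scan with its post-loop flush by an itertools.groupby decomposition of each row into maximal isnumeric runs, emitting one record per numeric group while advancing a running column index.
import Mathlib
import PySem

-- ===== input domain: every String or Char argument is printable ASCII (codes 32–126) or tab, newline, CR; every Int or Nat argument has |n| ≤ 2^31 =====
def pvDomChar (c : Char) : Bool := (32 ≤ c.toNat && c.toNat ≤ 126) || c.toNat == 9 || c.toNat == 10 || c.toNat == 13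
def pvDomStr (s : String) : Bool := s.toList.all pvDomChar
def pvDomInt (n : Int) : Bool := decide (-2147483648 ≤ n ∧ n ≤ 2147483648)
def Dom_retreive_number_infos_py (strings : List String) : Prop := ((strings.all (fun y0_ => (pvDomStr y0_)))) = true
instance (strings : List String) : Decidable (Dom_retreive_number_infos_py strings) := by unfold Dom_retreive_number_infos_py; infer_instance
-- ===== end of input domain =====

-- B replaces A's stateful in_number/start_idx scan (with its post-loop flush) by an
-- itertools.groupby decomposition of each row into maximal digit runs (objective: idiomatic).
-- On the ASCII domain str.isnumeric coincides with PySem.Chars.isdigit, which both ports use.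

-- ===== PORT A =====
-- int(s) on the (always nonempty, all-digit) slices A takes never raises; the getD 0 default is unreachable.
def pvNum (cs : List Char) : Int := (PySem.Int.ofChars? cs).getD 0

-- A's inner `for i_col, col in enumerate(row)` as an index recursion over the row,
-- carrying (start_idx, in_number, number_infos); the `else` branch is the post-loop flush.
def pvALoop (ir : Int) (row : List Char) (i start : Nat) (inNum : Bool)
    (acc : List (Int × Int × Int × Int)) : List (Int × Int × Int × Int) :=
  if h : i < row.length then
    if PySem.Chars.isdigit row[i] then
      if inNum then pvALoop ir row (i + 1) start true acc
      else pvALoop ir row (i + 1) i true acc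
    else
      if inNum then
        pvALoop ir row (i + 1) start false
          (acc ++ [(pvNum (PySem.List.slice row (some (start : Int)) (some (i : Int))),
                    (start : Int), (i : Int), ir)])
      else pvALoop ir row (i + 1) start false acc
  else
    if inNum then
      acc ++ [(pvNum (PySem.List.slice row (some (start : Int)) (some (row.length : Int))),
               (start : Int), (row.length : Int), ir)]
    else acc
termination_by row.length - i

def retreive_number_infos_py (strings : List String) : List (Int × Int × Int × Int) :=
  (PySem.List.enumerate strings 0).foldl
    (fun acc p => pvALoop p.1 p.2.toList 0 0 false acc) []

-- ===== PORT B =====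
-- list(groupby(row, key=str.isnumeric)) with each group materialised: maximal runs of equal key.
def pvGroups (l : List Char) : List (Bool × List Char) :=
  match l with
  | [] => []
  | c :: rest =>
    match pvGroups rest with
    | (k, g) :: gs =>
        if PySem.Chars.isdigit c == k then (k, c :: g) :: gs
        else (PySem.Chars.isdigit c, [c]) :: (k, g) :: gs
    | [] => [(PySem.Chars.isdigit c, [c])]

-- B's inner loop over the groups: emit a record for a numeric group, advance col by its length.
def pvEmit (ir : Int) (gs : List (Bool × List Char)) (col : Int) : List (Int × Int × Int × Int) :=
  match gs with
  | [] => []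
  | (k, g) :: rest =>
      (if k then [(pvNum g, col, col + (g.length : Int), ir)] else []) ++
        pvEmit ir rest (col + (g.length : Int))

def retreive_number_infos_py_alt (strings : List String) : List (Int × Int × Int × Int) :=
  (PySem.List.enumerate strings 0).foldl
    (fun acc p => acc ++ pvEmit p.1 (pvGroups p.2.toList) 0) []

-- ===== PRECONDITION & SPEC =====
def Spec_retreive_number_infos_py (strings : List String) (out : List (Int × Int × Int × Int)) : Prop := out = retreive_number_infos_py_alt strings
instance (strings : List String) (out : List (Int × Int × Int × Int)) : Decidable (Spec_retreive_number_infos_py strings out) := by unfold Spec_retreive_number_infos_py; infer_instance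

-- ===== CLAIM (what is proved, stated in full; the proofs are below) =====
def Claim_equal_retreive_number_infos_py : Prop := ∀ (strings : List String), Dom_retreive_number_infos_py strings → Spec_retreive_number_infos_py strings (retreive_number_infos_py strings)

-- ===== LEMMAS AND PROOFS =====

-- one-step unfolding of pvGroups on a cons (kept as an equation so `rw` can use it)
theorem pvGroups_cons (c : Char) (xs : List Char) :
    pvGroups (c :: xs) =
      (match pvGroups xs with
       | (k, g) :: gs =>
           if PySem.Chars.isdigit c == k then (k, c :: g) :: gs
           else (PySem.Chars.isdigit c, [c]) :: (k, g) :: gs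
       | [] => [(PySem.Chars.isdigit c, [c])]) := rfl

-- the first group of a nonempty list is keyed by its first character
theorem pvGroups_head_key (c : Char) (xs : List Char) :
    ∃ g gs, pvGroups (c :: xs) = (PySem.Chars.isdigit c, g) :: gs := by
  unfold pvGroups
  rcases h : pvGroups xs with _ | ⟨⟨k, g⟩, gs⟩
  · exact ⟨[c], [], rfl⟩
  · by_cases hk : PySem.Chars.isdigit c = k
    · subst hk; exact ⟨c :: g, gs, by simp⟩
    · exact ⟨[c], (k, g) :: gs, by simp [hk]⟩

-- a leading non-digit character is absorbed by advancing col by 1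
theorem pvEmit_groups_cons_nondigit (ir : Int) (c : Char) (xs : List Char) (col : Int)
    (h : PySem.Chars.isdigit c = false) :
    pvEmit ir (pvGroups (c :: xs)) col = pvEmit ir (pvGroups xs) (col + 1) := by
  conv_lhs => rw [pvGroups]
  rcases hg : pvGroups xs with _ | ⟨⟨k, g⟩, gs⟩
  · simp [pvEmit, h]
  · by_cases hk : k = false
    · subst hk
      simp only [h, beq_self_eq_true, if_true, pvEmit, List.length_cons]
      push_cast; ring_nf
    · simp only [Bool.not_eq_false] at hk; subst hk
      simp [h, pvEmit]

-- a maximal digit run forms exactly one group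
theorem pvGroups_digit_run (r rest : List Char) (hr : r ≠ [])
    (hd : ∀ c ∈ r, PySem.Chars.isdigit c = true)
    (hrest : rest = [] ∨ ∃ c xs, rest = c :: xs ∧ PySem.Chars.isdigit c = false) :
    pvGroups (r ++ rest) = (true, r) :: pvGroups rest := by
  induction r with
  | nil => exact absurd rfl hr
  | cons d r' ih =>
    have hdd : PySem.Chars.isdigit d = true := hd d (by simp)
    rcases Decidable.em (r' = []) with h' | h'
    · subst h'
      rcases hrest with h0 | ⟨c, xs, hcx, hc⟩
      · subst h0; simp [pvGroups, hdd]
      · subst hcx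
        obtain ⟨g, gs, hg⟩ := pvGroups_head_key c xs
        rw [List.singleton_append, pvGroups_cons, hg]
        simp [hc, hdd]
    · have := ih h' (fun c hc => hd c (by simp [hc]))
      simp only [List.cons_append, pvGroups, this, hdd, beq_self_eq_true, if_true]

-- main invariant: A's scanner from position i equals B's emitter on the remaining groups.
-- Part 2 carries the pending digit run row[start:i) explicitly.
theorem pvALoop_eq_emit (row : List Char) (ir : Int) :
    ∀ n i, row.length - i = n →
      ((∀ start acc, pvALoop ir row i start false acc =
          acc ++ pvEmit ir (pvGroups (row.drop i)) (i : Int)) ∧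
       (∀ start acc, start < i → i ≤ row.length →
          (∀ c ∈ (row.drop start).take (i - start), PySem.Chars.isdigit c = true) →
          pvALoop ir row i start true acc =
            acc ++ pvEmit ir (pvGroups ((row.drop start).take (i - start) ++ row.drop i))
              (start : Int))) := by
  intro n
  induction n with
  | zero =>
    intro i hi
    have hlen : row.length ≤ i := by omega
    constructor
    · intro start acc
      rw [pvALoop]
      simp [Nat.not_lt.mpr hlen, List.drop_eq_nil_of_le hlen, pvGroups, pvEmit]
    · intro start acc hsi hile hd
      have hieq : i = row.length := le_antisymm hile hlen
      subst hieq
      rw [pvALoop]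
      simp only [lt_self_iff_false, dite_false, if_true]
      have hdrop : (row.drop start).take (row.length - start) = row.drop start := by
        apply List.take_of_length_le; simp
      have hne : row.drop start ≠ [] := by
        intro h0
        have := List.length_drop (l := row) (i := start)
        rw [h0] at this; simp at this; omega
      have hrun := pvGroups_digit_run (row.drop start) [] hne
        (by rw [hdrop] at hd; exact hd) (Or.inl rfl)
      rw [List.append_nil] at hrun
      rw [List.drop_eq_nil_of_le (le_refl _), hdrop, List.append_nil, hrun]
      simp only [pvGroups, pvEmit, if_true, List.append_nil]
      have hlen2 : ((row.drop start).length : Int) = (row.length : Int) - (start : Int) := by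
        simp [List.length_drop]; omega
      rw [PySem.List.slice_natCast]
      rw [hdrop, hlen2]
      ring_nf
  | succ n ihn =>
    intro i hi
    have hlt : i < row.length := by omega
    have ih := ihn (i + 1) (by omega)
    constructor
    · intro start acc
      rw [pvALoop]
      simp only [hlt, dite_true]
      by_cases hdig : PySem.Chars.isdigit row[i] = true
      · simp only [hdig, if_true, if_false, Bool.false_eq_true]
        have htake : (row.drop i).take (i + 1 - i) = [row[i]] := by
          rw [show i + 1 - i = 1 from by omega, List.drop_eq_getElem_cons hlt,
            List.take_one]
          rfl
        have h2 := ih.2 i acc (by omega) (by omega)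
          (by rw [htake]; intro c hc; simp at hc; subst hc; exact hdig)
        rw [h2, htake, List.singleton_append, ← List.drop_eq_getElem_cons hlt]
      · simp only [Bool.not_eq_true] at hdig
        simp only [hdig, if_false, Bool.false_eq_true]
        rw [ih.1 start acc]
        rw [List.drop_eq_getElem_cons hlt,
          pvEmit_groups_cons_nondigit ir row[i] (row.drop (i + 1)) _ hdig]
        congr 1
    · intro start acc hsi hile hd
      rw [pvALoop]
      simp only [hlt, dite_true]
      have hdlen : ((row.drop start).take (i - start)).length = i - start := by
        simp [List.length_take, List.length_drop]; omega
      have hdne : (row.drop start).take (i - start) ≠ [] := by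
        intro h0; rw [h0] at hdlen; simp at hdlen; omega
      have hstep : (row.drop start).take (i + 1 - start) =
          (row.drop start).take (i - start) ++ [row[i]] := by
        have h1 : i + 1 - start = (i - start) + 1 := by omega
        rw [h1, List.take_add_one]
        congr 1
        have hq : (row.drop start)[i - start]? = row[start + (i - start)]? := by
          rw [List.getElem?_drop]
        have h2' : start + (i - start) = i := by omega
        rw [hq, h2', List.getElem?_eq_getElem hlt]
        rfl
      by_cases hdig : PySem.Chars.isdigit row[i] = true
      · simp only [hdig, if_true]
        have h2 := ih.2 start acc (by omega) (by omega)
          (by rw [hstep]; intro c hc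
              rcases List.mem_append.mp hc with h | h
              · exact hd c h
              · simp at h; subst h; exact hdig)
        rw [h2, hstep, List.drop_eq_getElem_cons hlt, List.append_assoc,
          List.singleton_append]
      · simp only [Bool.not_eq_true] at hdig
        simp only [hdig, if_true, Bool.false_eq_true, if_false]
        rw [ih.1 start _]
        have hdropi : row.drop i = row[i] :: row.drop (i + 1) := List.drop_eq_getElem_cons hlt
        rw [hdropi, pvGroups_digit_run _ _ hdne hd (Or.inr ⟨row[i], row.drop (i + 1), rfl, hdig⟩)]
        simp only [pvEmit, if_true, List.append_assoc, List.singleton_append]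
        have hcol : (start : Int) + (((row.drop start).take (i - start)).length : Int) = (i : Int) := by
          rw [hdlen]; omega
        rw [hcol, pvEmit_groups_cons_nondigit ir row[i] (row.drop (i + 1)) _ hdig]
        rw [PySem.List.slice_natCast]
        norm_cast

-- one row: A's scan of the whole row equals B's emission of its groups
theorem pvRow_eq (ir : Int) (row : List Char) (acc : List (Int × Int × Int × Int)) :
    pvALoop ir row 0 0 false acc = acc ++ pvEmit ir (pvGroups row) 0 := by
  have h := (pvALoop_eq_emit row ir (row.length - 0) 0 rfl).1 0 acc
  simpa using h

theorem pvFoldl_eq (l : List (Int × String)) :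
    ∀ acc, l.foldl (fun acc p => pvALoop p.1 p.2.toList 0 0 false acc) acc =
      l.foldl (fun acc p => acc ++ pvEmit p.1 (pvGroups p.2.toList) 0) acc := by
  intro acc
  have hfun : (fun (acc : List (Int × Int × Int × Int)) (p : Int × String) =>
      pvALoop p.1 p.2.toList 0 0 false acc) =
      (fun acc p => acc ++ pvEmit p.1 (pvGroups p.2.toList) 0) := by
    funext acc p
    exact pvRow_eq _ _ _
  rw [hfun]

-- ===== VERDICT (by name: the statement is the Claim_ definition above) =====
theorem retreive_number_infos_py_spec : Claim_equal_retreive_number_infos_py := by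
  intro strings _
  unfold Spec_retreive_number_infos_py retreive_number_infos_py retreive_number_infos_py_alt
  exact pvFoldl_eq (PySem.List.enumerate strings 0) []
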